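-- pv_equiv track=rewrite | github.com/denisrmp/hacker-rank | hacker-rank/implementation/acm_icpc_team.py | acm_icpc_team
-- ===== SOURCE A (Python) =====
-- def union(p1, p2):
--     return [t1 | t2 for t1, t2 in zip(p1, p2)]
--
-- def acm_icpc_team(persons):
--     max_t, max_qty = 0, 0
--     for i, p1 in enumerate(persons):
--         for j, p2 in enumerate(persons[(i + 1):], i + 1):
--             t = sum(union(p1, p2))
--             if t == max_t:
--                 max_qty += 1
--             elif t > max_t:
--                 max_t, max_qty = t, 1
--     return max_t, max_qty
-- ===== SOURCE B (Python) =====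
-- def acm_icpc_team(persons):
--     # Group identical topic rows first, then score each unordered pair of
--     # DISTINCT rows once, weighting it by the product of multiplicities
--     # (and a row with itself by c*(c-1)//2 pairs, whose score is sum(row)).
--     counts = {}
--     for p in persons:
--         k = tuple(p)
--         counts[k] = counts.get(k, 0) + 1
--     groups = list(counts.items())
--     best, qty = 0, 0
--     for i, (r, c) in enumerate(groups):
--         w = c * (c - 1) // 2
--         if w:
--             t = sum(r)
--             if t == best:
--                 qty += w
--             elif t > best:
--                 best, qty = t, w
--         for s, c2 in groups[i + 1:]:
--             t = sum(x | y for x, y in zip(r, s))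
--             w = c * c2
--             if t == best:
--                 qty += w
--             elif t > best:
--                 best, qty = t, w
--     return best, qty
-- ===== Notes on version B (the rewrite author's own statement) =====
-- stated objective: alternative
-- what changed: B first groups identical topic rows into a multiplicity table (dict), then scores each unordered pair of DISTINCT rows once, weighting its contribution to the count by the product of multiplicities (c*(c-1)//2 for a row paired with itself), instead of A's nested loops over all index pairs with a running max/count.
import Mathlib
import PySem

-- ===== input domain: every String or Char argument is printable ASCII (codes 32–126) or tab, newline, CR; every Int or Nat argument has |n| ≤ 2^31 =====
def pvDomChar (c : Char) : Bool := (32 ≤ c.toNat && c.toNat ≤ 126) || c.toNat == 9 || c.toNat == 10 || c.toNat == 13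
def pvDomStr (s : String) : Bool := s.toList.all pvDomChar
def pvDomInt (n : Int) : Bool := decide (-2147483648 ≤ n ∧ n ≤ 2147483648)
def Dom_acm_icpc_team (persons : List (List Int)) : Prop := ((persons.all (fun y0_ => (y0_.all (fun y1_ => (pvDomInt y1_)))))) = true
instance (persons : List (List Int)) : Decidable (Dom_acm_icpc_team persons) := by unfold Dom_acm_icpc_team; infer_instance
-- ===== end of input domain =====

-- B groups identical topic rows into a multiplicity table first and scores each unordered pair of
-- DISTINCT rows once, weighted by the product of multiplicities (c*(c-1)//2 for a row with itself),
-- instead of A's nested loops over all index pairs; an alternative algorithm of similar cost.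


-- ===== PORT A =====
-- union(p1, p2) = [t1 | t2 for t1, t2 in zip(p1, p2)]
def pyUnion (p1 p2 : List Int) : List Int :=
  (p1.zip p2).map (fun t => PySem.Int.bor t.1 t.2)

-- literal transliteration of A: nested enumerate loops with a running (max_t, max_qty) accumulator
def acm_icpc_team (persons : List (List Int)) : Int × Int :=
  (PySem.List.enumerate persons).foldl
    (fun st ip =>
      (PySem.List.enumerate (PySem.List.slice persons (some (ip.1 + 1)) none) (ip.1 + 1)).foldl
        (fun st jp =>
          let t := (pyUnion ip.2 jp.2).sum
          if t = st.1 then (st.1, st.2 + 1)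
          else if st.1 < t then (t, 1)
          else st)
        st)
    (0, 0)

-- ===== PORT B =====
-- literal transliteration of Source B: build the {row: multiplicity} dict, then loop over the
-- DISTINCT rows (dict items), weighting each pair's contribution by the multiplicities
def acm_icpc_team_alt (persons : List (List Int)) : Int × Int :=
  let counts := persons.foldl (fun d p => d.insert p (d.getD p 0 + 1)) PySem.Dict.empty
  let groups := counts.items
  (PySem.List.enumerate groups).foldl
    (fun st irc =>
      let r := irc.2.1
      let c := irc.2.2
      let w := PySem.Int.floordiv (c * (c - 1)) 2
      let st1 :=
        if w ≠ 0 then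
          let t := r.sum
          if t = st.1 then (st.1, st.2 + w)
          else if st.1 < t then (t, w)
          else st
        else st
      (PySem.List.slice groups (some (irc.1 + 1)) none).foldl
        (fun st sc2 =>
          let t := ((r.zip sc2.1).map (fun xy => PySem.Int.bor xy.1 xy.2)).sum
          let w2 := c * sc2.2
          if t = st.1 then (st.1, st.2 + w2)
          else if st.1 < t then (t, w2)
          else st)
        st1)
    (0, 0)

-- ===== PRECONDITION & SPEC =====
def Spec_acm_icpc_team (persons : List (List Int)) (out : Int × Int) : Prop := out = acm_icpc_team_alt persons
instance (persons : List (List Int)) (out : Int × Int) : Decidable (Spec_acm_icpc_team persons out) := by unfold Spec_acm_icpc_team; infer_instance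

-- ===== CLAIM (what is proved, stated in full; the proofs are below) =====
def Claim_equal_acm_icpc_team : Prop := ∀ (persons : List (List Int)), Dom_acm_icpc_team persons → Spec_acm_icpc_team persons (acm_icpc_team persons)

-- ===== LEMMAS AND PROOFS =====

def pvSc (r s : List Int) : Int := ((r.zip s).map (fun xy => PySem.Int.bor xy.1 xy.2)).sum

def pvStep (st : Int × Int) (t : Int) : Int × Int :=
  if t = st.1 then (st.1, st.2 + 1)
  else if st.1 < t then (t, 1)
  else st

def pairScores : List (List Int) → List Int
  | [] => []
  | p :: rest => rest.map (fun q => pvSc p q) ++ pairScores rest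

def pvC2 (c : Int) : Int := PySem.Int.floordiv (c * (c - 1)) 2

def pvWStep (st : Int × Int) (tw : Int × Int) : Int × Int :=
  if tw.1 = st.1 then (st.1, st.2 + tw.2)
  else if st.1 < tw.1 then (tw.1, tw.2)
  else st

def wpairs : List (List Int × Int) → List (Int × Int)
  | [] => []
  | (r, c) :: rest =>
      (if pvC2 c ≠ 0 then [(r.sum, pvC2 c)] else []) ++
      rest.map (fun s => (pvSc r s.1, c * s.2)) ++ wpairs rest

def pvGps (xs : List (List Int)) : List (List Int × Int) :=
  (PySem.Set.ofList xs).map (fun r => (r, (xs.count r : Int)))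

def wcount (wl : List (Int × Int)) (v : Int) : Int :=
  (wl.map (fun tw => if tw.1 = v then tw.2 else 0)).sum

def pvWA (l : List (List Int × Int)) (v : Int) : Int :=
  match l with
  | [] => 0
  | (r, c) :: rest =>
      (if r.sum = v then pvC2 c else 0) +
      (rest.map (fun s => if pvSc r s.1 = v then c * s.2 else 0)).sum + pvWA rest v

theorem bor_self' (x : Int) : PySem.Int.bor x x = x := by
  unfold PySem.Int.bor
  split_ifs with h
  · simp [Nat.or_self]; omega
  · simp [Nat.and_self]; omega

theorem pvSc_comm (r s : List Int) : pvSc r s = pvSc s r := by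
  unfold pvSc
  rw [← List.zip_swap r s, List.map_map]
  congr 1
  exact List.map_congr_left (fun xy _ => PySem.Int.bor_comm _ _)

theorem pvSc_self (r : List Int) : pvSc r r = r.sum := by
  induction r with
  | nil => rfl
  | cons x t ih => simp [pvSc, List.zip_cons_cons, bor_self'] at ih ⊢; exact ih

theorem foldl_enumerate_snd {α β : Type} (f : β → α → β) (l : List α) (s : Int) (st : β) :
    (PySem.List.enumerate l s).foldl (fun st jp => f st jp.2) st = l.foldl f st := by
  induction l generalizing s st with
  | nil => simp [PySem.List.enumerate_nil]
  | cons x xs ih => simp [PySem.List.enumerate_cons, List.foldl, ih]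

theorem A_fold_aux (full : List (List Int)) :
    ∀ (l : List (List Int)) (s : Nat) (st : Int × Int), full.drop s = l →
    (PySem.List.enumerate l (s : Int)).foldl
      (fun st ip =>
        (PySem.List.enumerate (PySem.List.slice full (some (ip.1 + 1)) none) (ip.1 + 1)).foldl
          (fun st jp =>
            let t := (pyUnion ip.2 jp.2).sum
            if t = st.1 then (st.1, st.2 + 1)
            else if st.1 < t then (t, 1)
            else st)
          st)
      st
    = (pairScores l).foldl pvStep st := by
  intro l
  induction l with
  | nil => intro s st h; simp [PySem.List.enumerate_nil, pairScores]
  | cons p rest ih =>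
    intro s st h
    have hdrop : full.drop (s + 1) = rest := by
      rw [← List.drop_drop]  -- drop 1 (drop s full)?
      rw [h]
      rfl
    rw [PySem.List.enumerate_cons, List.foldl_cons]
    have hcast : (s : Int) + 1 = ((s + 1 : Nat) : Int) := by push_cast; ring
    rw [hcast, PySem.List.slice_from_natCast, hdrop]
    rw [ih (s + 1) _ hdrop]
    show (pairScores rest).foldl pvStep
        ((PySem.List.enumerate rest _).foldl (fun st jp => pvStep st ((pyUnion p jp.2).sum)) st) = _
    rw [foldl_enumerate_snd (fun st p2 => pvStep st ((pyUnion p p2).sum)) rest _ st]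
    show _ = (pairScores (p :: rest)).foldl pvStep st
    rw [pairScores, List.foldl_append, List.foldl_map]
    rfl

theorem acm_icpc_team_eq_stepfold (persons : List (List Int)) :
    acm_icpc_team persons = (pairScores persons).foldl pvStep (0, 0) := by
  have := A_fold_aux persons persons 0 (0, 0) (by simp)
  simpa [acm_icpc_team] using this

theorem stepfold_eq (ts : List Int) (m q : Int) :
    ts.foldl pvStep (m, q) =
      (ts.foldl max m,
        (if ts.foldl max m = m then q else 0) + (ts.count (ts.foldl max m) : Int)) := by
  induction ts generalizing m q with
  | nil => simp
  | cons t rest ih =>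
    have hle : max m t ≤ rest.foldl max (max m t) := (PySem.List.le_foldl_max rest (max m t)).1
    simp only [List.foldl, pvStep]
    by_cases h1 : t = m
    · subst h1
      rw [ih]
      have hmm : max t t = t := by omega
      rw [List.count_cons]
      simp only [hmm]
      by_cases h2 : rest.foldl max t = t
      · simp [h2]; omega
      · have : ¬ (t == rest.foldl max t) = true := by
          simp; intro h; exact h2 h.symm
        simp [h2, this]
    · simp only [if_neg h1]
      by_cases h2 : m < t
      · simp only [if_pos h2]
        rw [ih]
        have hmx : max m t = t := by omega
        have hMt : t ≤ rest.foldl max t := by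
          have := (PySem.List.le_foldl_max rest t).1; omega
        simp only [hmx] at hle ⊢
        rw [List.count_cons]
        have hne : rest.foldl max t ≠ m := by omega
        by_cases h3 : rest.foldl max t = t
        · simp [h3, h1]
          omega
        · have : ¬ (t == rest.foldl max t) = true := by
            simp; intro h; exact h3 h.symm
          simp [h3, this, hne]
      · simp only [if_neg h2]
        rw [ih]
        have hmx : max m t = m := by omega
        simp only [hmx]
        have hMm : m ≤ rest.foldl max m := (PySem.List.le_foldl_max rest m).1
        have htM : t ≠ rest.foldl max m := by omega
        rw [List.count_cons]
        have : ¬ (t == rest.foldl max m) = true := by simp; exact htM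
        simp [this]

theorem B_fold_aux (full : List (List Int × Int)) :
    ∀ (l : List (List Int × Int)) (s : Nat) (st : Int × Int), full.drop s = l →
    (PySem.List.enumerate l (s : Int)).foldl
      (fun (st : Int × Int) (irc : Int × (List Int × Int)) =>
        let r := irc.2.1
        let c := irc.2.2
        let w := PySem.Int.floordiv (c * (c - 1)) 2
        let st1 :=
          if w ≠ 0 then
            let t := r.sum
            if t = st.1 then (st.1, st.2 + w)
            else if st.1 < t then (t, w)
            else st
          else st
        (PySem.List.slice full (some (irc.1 + 1)) none).foldl
          (fun st sc2 =>
            let t := ((r.zip sc2.1).map (fun xy => PySem.Int.bor xy.1 xy.2)).sum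
            let w2 := c * sc2.2
            if t = st.1 then (st.1, st.2 + w2)
            else if st.1 < t then (t, w2)
            else st)
          st1)
      st
    = (wpairs l).foldl pvWStep st := by
  intro l
  induction l with
  | nil => intro s st h; simp [PySem.List.enumerate_nil, wpairs]
  | cons x rest ih =>
    obtain ⟨r, c⟩ := x
    intro s st h
    have hdrop : full.drop (s + 1) = rest := by
      rw [← List.drop_drop, h]; rfl
    rw [PySem.List.enumerate_cons]
    simp only [List.foldl_cons]
    have hcast : (s : Int) + 1 = ((s + 1 : Nat) : Int) := by push_cast; ring
    rw [hcast, PySem.List.slice_from_natCast, hdrop]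
    rw [ih (s + 1) _ hdrop]
    rw [wpairs, List.foldl_append, List.foldl_append, List.foldl_map]
    congr 1
    by_cases hw : pvC2 c ≠ 0
    · simp only [if_pos hw, List.foldl_cons, List.foldl_nil, pvWStep, pvSc]
      simp only [pvC2] at hw
      rw [if_pos hw]
      simp only [pvC2]
    · simp only [if_neg hw, List.foldl_nil]
      simp only [pvC2] at hw
      rw [if_neg hw]
      simp only [pvWStep, pvSc]

theorem acm_icpc_team_alt_eq_wstepfold (persons : List (List Int)) :
    acm_icpc_team_alt persons = (wpairs (pvGps persons)).foldl pvWStep (0, 0) := by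
  have hg : (persons.foldl (fun d p => d.insert p (d.getD p 0 + 1)) PySem.Dict.empty).items
      = pvGps persons := by
    rw [PySem.Dict.foldl_insert_getD_add_one_eq_counter, PySem.Dict.items_counter]
    rfl
  have := B_fold_aux (pvGps persons) (pvGps persons) 0 (0, 0) (by simp)
  simp only [acm_icpc_team_alt, hg]
  simpa using this

theorem wstepfold_eq (wl : List (Int × Int)) (m q : Int) :
    wl.foldl pvWStep (m, q) =
      ((wl.map Prod.fst).foldl max m,
        (if (wl.map Prod.fst).foldl max m = m then q else 0) +
          wcount wl ((wl.map Prod.fst).foldl max m)) := by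
  induction wl generalizing m q with
  | nil => simp [wcount]
  | cons tw rest ih =>
    obtain ⟨t, w⟩ := tw
    have hle : max m t ≤ (rest.map Prod.fst).foldl max (max m t) :=
      (PySem.List.le_foldl_max (rest.map Prod.fst) (max m t)).1
    simp only [List.map_cons, List.foldl_cons, pvWStep, wcount, List.map_cons, List.sum_cons]
    by_cases h1 : t = m
    · subst h1
      rw [ih]
      have hmm : max t t = t := by omega
      simp only [hmm, wcount]
      by_cases h2 : (rest.map Prod.fst).foldl max t = t
      · simp [h2]; ring
      · have : (rest.map Prod.fst).foldl max t ≠ t := h2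
        simp [h2, Ne.symm this]
    · simp only [if_neg h1]
      by_cases h2 : m < t
      · simp only [if_pos h2]
        rw [ih]
        have hmx : max m t = t := by omega
        have hMt : t ≤ (rest.map Prod.fst).foldl max t := by
          have := (PySem.List.le_foldl_max (rest.map Prod.fst) t).1; omega
        simp only [hmx] at hle ⊢
        have hne : (rest.map Prod.fst).foldl max t ≠ m := by omega
        by_cases h3 : (rest.map Prod.fst).foldl max t = t
        · simp [h3, h1, wcount]
        · simp [h3, Ne.symm h3, hne, wcount]
      · simp only [if_neg h2]
        rw [ih]
        have hmx : max m t = m := by omega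
        simp only [hmx, wcount]
        have hMm : m ≤ (rest.map Prod.fst).foldl max m :=
          (PySem.List.le_foldl_max (rest.map Prod.fst) m).1
        have htM : t ≠ (rest.map Prod.fst).foldl max m := by omega
        simp [htM]

theorem wcount_wpairs (l : List (List Int × Int)) (v : Int) :
    wcount (wpairs l) v = pvWA l v := by
  induction l with
  | nil => rfl
  | cons x rest ih =>
    obtain ⟨r, c⟩ := x
    simp only [wpairs, pvWA, wcount, List.map_append, List.sum_append, List.map_map]
    rw [← ih]
    simp only [wcount]
    congr 1
    congr 1
    · by_cases hw : pvC2 c ≠ 0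
      · simp [hw]
      · push Not at hw
        simp [hw]

theorem sum_map_update {α : Type} [DecidableEq α] (L : List α) (g g' : α → Int) (p : α)
    (hp : p ∈ L) (hnd : L.Nodup) (hagree : ∀ r ∈ L, r ≠ p → g' r = g r) :
    (L.map g').sum = (L.map g).sum + (g' p - g p) := by
  induction L with
  | nil => cases hp
  | cons x rest ih =>
    simp only [List.map_cons, List.sum_cons]
    rcases List.mem_cons.mp hp with hx | hx
    · subst hx
      have hnp : p ∉ rest := (List.nodup_cons.mp hnd).1
      have : rest.map g' = rest.map g := by
        apply List.map_congr_left
        intro r hr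
        exact hagree r (List.mem_cons_of_mem _ hr) (fun e => hnp (e ▸ hr))
      rw [this]; ring
    · have hxp : x ≠ p := fun e => ((List.nodup_cons.mp hnd).1 (e ▸ hx))
      rw [hagree x (List.mem_cons_self) hxp,
        ih hx (List.nodup_cons.mp hnd).2 (fun r hr => hagree r (List.mem_cons_of_mem _ hr))]
      ring

theorem ofList_snoc {α : Type} [BEq α] [LawfulBEq α] (xs : List α) (p : α) :
    PySem.Set.ofList (xs ++ [p]) =
      if p ∈ xs then PySem.Set.ofList xs else PySem.Set.ofList xs ++ [p] := by
  rw [PySem.Set.ofList_append]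
  show (PySem.Set.ofList xs).add p = _
  rw [PySem.Set.add]
  by_cases hp : p ∈ xs
  · rw [if_pos hp, if_pos]
    simp [PySem.Set.mem_ofList, hp]
  · rw [if_neg hp, if_neg]
    simp [PySem.Set.mem_ofList, hp]

theorem count_map_eq_gps_sum (f : List Int → Int) (xs : List (List Int)) (v : Int) :
    (((xs.map f).count v : Nat) : Int) =
      ((PySem.Set.ofList xs).map (fun r => if f r = v then (xs.count r : Int) else 0)).sum := by
  induction xs using List.reverseRecOn with
  | nil => rfl
  | append_singleton xs p ih =>
    rw [List.map_append, List.count_append]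
    push_cast
    rw [ih, ofList_snoc]
    by_cases hp : p ∈ xs
    · rw [if_pos hp]
      rw [sum_map_update (PySem.Set.ofList xs)
        (fun r => if f r = v then (xs.count r : Int) else 0)
        (fun r => if f r = v then ((xs ++ [p]).count r : Int) else 0) p
        ((PySem.Set.mem_ofList xs p).mpr hp) (PySem.Set.nodup_ofList xs)
        (by
          intro r hr hrp
          have : (xs ++ [p]).count r = xs.count r := by
            rw [List.count_append]
            simp [Ne.symm hrp]
          simp [this])]
      have : (xs ++ [p]).count p = xs.count p + 1 := by
        rw [List.count_append]; simp
      rw [this]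
      by_cases hf : f p = v <;> simp [hf, List.count_nil]
    · rw [if_neg hp, List.map_append, List.sum_append]
      have h1 : (PySem.Set.ofList xs).map (fun r => if f r = v then ((xs ++ [p]).count r : Int) else 0)
          = (PySem.Set.ofList xs).map (fun r => if f r = v then (xs.count r : Int) else 0) := by
        apply List.map_congr_left
        intro r hr
        have hrp : r ≠ p := fun e => hp (e ▸ (PySem.Set.mem_ofList xs r).mp hr)
        have : (xs ++ [p]).count r = xs.count r := by
          rw [List.count_append]
          simp [Ne.symm hrp]
        simp [this]
      rw [h1]
      have h2 : (xs ++ [p]).count p = 1 := by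
        rw [List.count_append]
        simp [List.count_eq_zero.mpr hp]
      simp only [List.map_cons, List.map_nil, List.sum_cons, List.sum_nil, h2]
      by_cases hf : f p = v <;> simp [hf]

theorem pvC2_succ (c : Int) : pvC2 (c + 1) = pvC2 c + c := by
  unfold pvC2
  obtain ⟨k, hk⟩ := Int.even_mul_succ_self (c - 1)
  have h1 : c * (c - 1) = 2 * k := by ring_nf at hk ⊢; linarith
  have h2 : (c + 1) * (c + 1 - 1) = 2 * (k + c) := by linear_combination h1
  rw [h1, h2, PySem.Int.floordiv_eq_ediv_of_pos (by norm_num),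
    PySem.Int.floordiv_eq_ediv_of_pos (by norm_num),
    Int.mul_ediv_cancel_left _ (by norm_num), Int.mul_ediv_cancel_left _ (by norm_num)]

theorem pvWA_update (L : List (List Int)) (c c' : List Int → Int) (p : List Int) (v : Int)
    (hp : p ∈ L) (hnd : L.Nodup) (hagree : ∀ r ∈ L, r ≠ p → c' r = c r)
    (hstep : c' p = c p + 1) :
    pvWA (L.map (fun r => (r, c' r))) v =
      pvWA (L.map (fun r => (r, c r))) v +
        (L.map (fun r => if pvSc r p = v then c r else 0)).sum := by
  induction L with
  | nil => cases hp
  | cons x L' ih =>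
    have hnd' := (List.nodup_cons.mp hnd).2
    simp only [List.map_cons, pvWA, List.map_map, List.sum_cons, Function.comp_def]
    rcases List.mem_cons.mp hp with hx | hx
    · subst hx
      have hnotin : p ∉ L' := (List.nodup_cons.mp hnd).1
      have hagree' : ∀ s ∈ L', c' s = c s := fun s hs =>
        hagree s (List.mem_cons_of_mem _ hs) (fun e => hnotin (e ▸ hs))
      have hself : (if p.sum = v then pvC2 (c' p) else 0)
          = (if p.sum = v then pvC2 (c p) else 0) + (if p.sum = v then c p else 0) := by
        rw [hstep, pvC2_succ]; split <;> simp
      have hpt : ∀ s ∈ L', (if pvSc p s = v then c' p * c' s else 0)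
          = (if pvSc p s = v then c p * c s else 0) + (if pvSc s p = v then c s else 0) := by
        intro s hs
        rw [hagree' s hs, hstep, pvSc_comm s p]
        split <;> ring
      have hcross : (L'.map (fun s => if pvSc p s = v then c' p * c' s else 0)).sum
          = (L'.map (fun s => if pvSc p s = v then c p * c s else 0)).sum
            + (L'.map (fun s => if pvSc s p = v then c s else 0)).sum := by
        rw [List.map_congr_left hpt, PySem.List.sum_map_add_int]
      have htail : pvWA (L'.map (fun r => (r, c' r))) v = pvWA (L'.map (fun r => (r, c r))) v := by
        rw [List.map_congr_left (fun s hs => by rw [hagree' s hs] : ∀ s ∈ L', (s, c' s) = (s, c s))]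
      rw [hself, hcross, htail, pvSc_self]
      ring
    · have hxp : x ≠ p := fun e => (List.nodup_cons.mp hnd).1 (e ▸ hx)
      have hcx : c' x = c x := hagree x List.mem_cons_self hxp
      have hcross : (L'.map (fun s => if pvSc x s = v then c' x * c' s else 0)).sum
          = (L'.map (fun s => if pvSc x s = v then c x * c s else 0)).sum
            + (if pvSc x p = v then c x else 0) := by
        rw [sum_map_update L' (fun s => if pvSc x s = v then c x * c s else 0)
          (fun s => if pvSc x s = v then c' x * c' s else 0) p hx hnd'
          (fun s hs hsp => by simp only [hagree s (List.mem_cons_of_mem _ hs) hsp, hcx])]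
        simp only [hcx, hstep]
        split_ifs <;> ring
      rw [hcross, hcx, ih hx hnd' (fun s hs => hagree s (List.mem_cons_of_mem _ hs))]
      ring

theorem count_pairScores_snoc (xs : List (List Int)) (p : List Int) (v : Int) :
    (pairScores (xs ++ [p])).count v
      = (pairScores xs).count v + (xs.map (fun q => pvSc q p)).count v := by
  induction xs with
  | nil => simp [pairScores]
  | cons x xs ih =>
    show (pairScores (x :: (xs ++ [p]))).count v = _
    rw [pairScores, pairScores, List.map_append, List.count_append, List.count_append,
      List.count_append, ih, List.map_cons, List.count_cons]
    simp only [List.map_cons, List.map_nil, List.count_cons, List.count_nil]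
    omega

theorem pvWA_append (l : List (List Int × Int)) (p : List Int) (w v : Int) :
    pvWA (l ++ [(p, w)]) v
      = pvWA l v + (l.map (fun rc => if pvSc rc.1 p = v then rc.2 * w else 0)).sum
        + (if p.sum = v then pvC2 w else 0) := by
  induction l with
  | nil => simp [pvWA]
  | cons rc l' ih =>
    obtain ⟨r, c⟩ := rc
    show pvWA ((r, c) :: (l' ++ [(p, w)])) v = _
    rw [pvWA]
    rw [List.map_append, List.sum_append, ih]
    simp only [pvWA, List.map_cons, List.map_nil, List.sum_cons, List.sum_nil]
    ring

theorem pvC2_one : pvC2 1 = 0 := by decide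

theorem count_bridge (xs : List (List Int)) (v : Int) :
    (((pairScores xs).count v : Nat) : Int) = pvWA (pvGps xs) v := by
  induction xs using List.reverseRecOn with
  | nil => rfl
  | append_singleton xs p ih =>
    rw [count_pairScores_snoc]
    push_cast
    rw [ih]
    by_cases hp : p ∈ xs
    · have hofl : PySem.Set.ofList (xs ++ [p]) = PySem.Set.ofList xs := by
        rw [ofList_snoc, if_pos hp]
      conv_rhs => rw [pvGps, hofl]
      rw [pvWA_update (PySem.Set.ofList xs)
        (fun r => (xs.count r : Int)) (fun r => ((xs ++ [p]).count r : Int)) p v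
        ((PySem.Set.mem_ofList xs p).mpr hp) (PySem.Set.nodup_ofList xs)
        (fun r _ hrp => by
          have : (xs ++ [p]).count r = xs.count r := by
            rw [List.count_append]; simp [Ne.symm hrp]
          simp [this])
        (by
          have : (xs ++ [p]).count p = xs.count p + 1 := by
            rw [List.count_append]; simp
          simp [this])]
      rw [← pvGps]
      congr 1
      rw [← count_map_eq_gps_sum (fun q => pvSc q p) xs v]
    · have hofl : PySem.Set.ofList (xs ++ [p]) = PySem.Set.ofList xs ++ [p] := by
        rw [ofList_snoc, if_neg hp]
      have hcnt1 : (xs ++ [p]).count p = 1 := by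
        rw [List.count_append]; simp [List.count_eq_zero.mpr hp]
      have hgps : pvGps (xs ++ [p]) = pvGps xs ++ [(p, 1)] := by
        rw [pvGps, hofl, List.map_append]
        congr 1
        · apply List.map_congr_left
          intro r hr
          have hrp : r ≠ p := fun e => hp (e ▸ (PySem.Set.mem_ofList xs r).mp hr)
          have : (xs ++ [p]).count r = xs.count r := by
            rw [List.count_append]; simp [Ne.symm hrp]
          rw [this]
        · simp [List.count_eq_zero.mpr hp]
      rw [hgps, pvWA_append, pvC2_one]
      simp only [mul_one, ite_self]
      have hsum : ((pvGps xs).map (fun rc => if pvSc rc.1 p = v then rc.2 else 0)).sum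
          = ((xs.map (fun q => pvSc q p)).count v : Int) := by
        rw [count_map_eq_gps_sum (fun q => pvSc q p) xs v, pvGps, List.map_map]
        rfl
      rw [hsum]
      simp

theorem pvC2_nonneg (c : Int) (hc : 1 ≤ c) : 0 ≤ pvC2 c := by
  unfold pvC2
  rw [PySem.Int.floordiv_eq_ediv_of_pos (by norm_num)]
  exact Int.ediv_nonneg (mul_nonneg (by omega) (by omega)) (by norm_num)

theorem wpairs_pos (l : List (List Int × Int)) (hc : ∀ rc ∈ l, 1 ≤ rc.2) :
    ∀ tw ∈ wpairs l, 0 < tw.2 := by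
  induction l with
  | nil => intro tw h; cases h
  | cons x rest ih =>
    obtain ⟨r, c⟩ := x
    intro tw htw
    rw [wpairs, List.mem_append, List.mem_append] at htw
    have hc1 : 1 ≤ c := hc (r, c) List.mem_cons_self
    rcases htw with (h | h) | h
    · by_cases hw : pvC2 c ≠ 0
      · rw [if_pos hw, List.mem_singleton] at h
        subst h
        have := pvC2_nonneg c hc1
        simp only []
        omega
      · rw [if_neg hw] at h; cases h
    · obtain ⟨s, hs, he⟩ := List.mem_map.mp h
      subst he
      have := hc s (List.mem_cons_of_mem _ hs)
      simp only []
      exact mul_pos (by omega) (by omega)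
    · exact ih (fun rc hrc => hc rc (List.mem_cons_of_mem _ hrc)) tw h

theorem gps_pos (xs : List (List Int)) : ∀ rc ∈ pvGps xs, 1 ≤ rc.2 := by
  intro rc hrc
  obtain ⟨r, hr, he⟩ := List.mem_map.mp hrc
  subst he
  have : r ∈ xs := (PySem.Set.mem_ofList xs r).mp hr
  have := List.count_pos_iff.mpr this
  simp only []
  omega

theorem wcount_nonneg (wl : List (Int × Int)) (v : Int) (hw : ∀ tw ∈ wl, 0 < tw.2) :
    0 ≤ wcount wl v := by
  induction wl with
  | nil => simp [wcount]
  | cons tw rest ih =>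
    have h1 := hw tw List.mem_cons_self
    have h2 := ih (fun x hx => hw x (List.mem_cons_of_mem _ hx))
    simp only [wcount, List.map_cons, List.sum_cons] at *
    split_ifs <;> omega

theorem wcount_ne_zero_iff (wl : List (Int × Int)) (v : Int) (hw : ∀ tw ∈ wl, 0 < tw.2) :
    wcount wl v ≠ 0 ↔ v ∈ wl.map Prod.fst := by
  induction wl with
  | nil => simp [wcount]
  | cons tw rest ih =>
    have h1 := hw tw List.mem_cons_self
    have h2 := wcount_nonneg rest v (fun x hx => hw x (List.mem_cons_of_mem _ hx))
    have ih' := ih (fun x hx => hw x (List.mem_cons_of_mem _ hx))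
    simp only [wcount, List.map_cons, List.sum_cons, List.mem_cons] at *
    by_cases he : tw.1 = v
    · rw [if_pos he]
      constructor
      · intro _; left; exact he.symm
      · intro _; omega
    · rw [if_neg he, zero_add]
      rw [ih']
      constructor
      · intro h; right; exact h
      · rintro (h | h)
        · exact absurd h.symm he
        · exact h

theorem foldl_max_congr_mem (l1 l2 : List Int) (a : Int) (h : ∀ v, v ∈ l1 ↔ v ∈ l2) :
    l1.foldl max a = l2.foldl max a := by
  have h1 := PySem.List.le_foldl_max l1 a
  have h2 := PySem.List.le_foldl_max l2 a
  have m1 := PySem.List.foldl_max_mem l1 a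
  have m2 := PySem.List.foldl_max_mem l2 a
  apply le_antisymm
  · rcases m1 with hm | hm
    · rw [hm]; exact h2.1
    · exact h2.2 _ ((h _).mp hm)
  · rcases m2 with hm | hm
    · rw [hm]; exact h1.1
    · exact h1.2 _ ((h _).mpr hm)

-- the running (max, count) fold is max-then-count

theorem final_assembly (persons : List (List Int)) :
    acm_icpc_team persons = acm_icpc_team_alt persons := by
  rw [acm_icpc_team_eq_stepfold, stepfold_eq, acm_icpc_team_alt_eq_wstepfold, wstepfold_eq]
  have hpos := wpairs_pos (pvGps persons) (gps_pos persons)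
  have hcnt : ∀ v, (((pairScores persons).count v : Nat) : Int)
      = wcount (wpairs (pvGps persons)) v :=
    fun v => (count_bridge persons v).trans (wcount_wpairs (pvGps persons) v).symm
  have hmem : ∀ v, v ∈ pairScores persons ↔ v ∈ (wpairs (pvGps persons)).map Prod.fst := by
    intro v
    rw [← wcount_ne_zero_iff _ _ hpos, ← hcnt v]
    constructor
    · intro hv
      have := List.count_pos_iff.mpr hv
      omega
    · intro hv
      by_contra hnv
      rw [List.count_eq_zero.mpr hnv] at hv
      simp at hv
  have hM : (pairScores persons).foldl max 0
      = ((wpairs (pvGps persons)).map Prod.fst).foldl max 0 :=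
    foldl_max_congr_mem _ _ 0 hmem
  rw [← hM, hcnt]

-- ===== VERDICT (by name: the statement is the Claim_ definition above) =====
theorem acm_icpc_team_spec : Claim_equal_acm_icpc_team := by
  intro persons _
  unfold Spec_acm_icpc_team
  exact final_assembly persons
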